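-- pv_equiv track=rewrite | github.com/LMP-dev/AdventOfCode | 2025/day_05/PuzzleA.py | _clean_first_list
-- ===== SOURCE A (Python) =====
-- def _clean_first_list(
--     first_list: list[int], second_list: list[int], inverse_lists: bool
-- ) -> tuple[list[int], list[int]]:
--     last_value = None
--     last_repeated_value = None
--     repeated_indexes: list[list[int]] = []
--     temp_index: list[int] = []
--
--     # Identify repeated values
--     for index, value in enumerate(first_list):
--         if value == last_value:
--             if value == last_repeated_value:
--                 temp_index.append(index)
--             else:
--                 temp_index.append(index - 1)
--                 temp_index.append(index)
--                 last_repeated_value = value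
--         else:
--             if temp_index:
--                 repeated_indexes.append(temp_index)
--             temp_index = []  # reset temporal list
--         last_value = value
--
--     # Remove repeated values
--     first_cleaned = first_list.copy()
--     second_cleaned = second_list.copy()
--     repeated_indexes.reverse()  # To start from end list so first indexes are mantained
--
--     for indexes in repeated_indexes:
--         to_remove = []
--         max_value = None
--         last_index = None
--         for index in indexes:
--             if max_value is None:
--                 max_value = second_list[index]
--                 last_index = index
--             else:
--                 if inverse_lists:
--                     if max_value > second_list[index]:
--                         to_remove.append(last_index)
--                         max_value = second_list[index]
--                         last_index = index
--                     else:
--                         to_remove.append(index)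
--                 else:
--                     if max_value < second_list[index]:
--                         to_remove.append(last_index)
--                         max_value = second_list[index]
--                         last_index = index
--                     else:
--                         to_remove.append(index)
--         # Remove from cleaned lists
--         ordered_to_remove = reversed(sorted(to_remove))
--
--         for k in ordered_to_remove:
--             _ = first_cleaned.pop(k)
--             _ = second_cleaned.pop(k)
--
--     return first_cleaned, second_cleaned
-- ===== SOURCE B (Python) =====
-- def _clean_first_list(
--     first_list: list[int], second_list: list[int], inverse_lists: bool
-- ) -> tuple[list[int], list[int]]:
--     removal = set()
--     i, n = 0, len(first_list)
--     while i < n: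
--         j = i
--         while j + 1 < n and first_list[j + 1] == first_list[i]:
--             j += 1
--         if j > i:
--             best = i
--             for k in range(i + 1, j + 1):
--                 better = (
--                     second_list[k] < second_list[best]
--                     if inverse_lists
--                     else second_list[k] > second_list[best]
--                 )
--                 if better:
--                     best = k
--             removal.update(k for k in range(i, j + 1) if k != best)
--         i = j + 1
--     first_cleaned = [v for k, v in enumerate(first_list) if k not in removal]
--     second_cleaned = [v for k, v in enumerate(second_list) if k not in removal]
--     return first_cleaned, second_cleaned
-- ===== Notes on version B (the rewrite author's own statement) =====
-- stated objective: simpler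
-- what changed: One forward index scan finds each maximal run and its best-kept index directly and collects removal indices into a set, then rebuilds both lists with a single enumerate-filter, instead of A's two-phase state machine (temp/last_repeated_value group builder, then per-group re-scan with sort, reverse and repeated in-place pops).
-- intended difference: On lists whose final run has length >= 2 or where two consecutive duplicate runs carry the same value, A never flushes the trailing run (returning its duplicates unremoved) or starts the group one element late because of the stale last_repeated_value (keeping an extra duplicate), while B removes all but the best entry of every duplicate run, which is the function's purpose. — e.g. on _clean_first_list([1, 1], [5, 7], false): A returns ([1, 1], [5, 7]), B returns ([1], [7])
-- outside the precondition, e.g. on _clean_first_list([1, 2, 2], [5], False): A returns ([1, 2, 2], [5]), B raises IndexError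
import Mathlib
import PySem

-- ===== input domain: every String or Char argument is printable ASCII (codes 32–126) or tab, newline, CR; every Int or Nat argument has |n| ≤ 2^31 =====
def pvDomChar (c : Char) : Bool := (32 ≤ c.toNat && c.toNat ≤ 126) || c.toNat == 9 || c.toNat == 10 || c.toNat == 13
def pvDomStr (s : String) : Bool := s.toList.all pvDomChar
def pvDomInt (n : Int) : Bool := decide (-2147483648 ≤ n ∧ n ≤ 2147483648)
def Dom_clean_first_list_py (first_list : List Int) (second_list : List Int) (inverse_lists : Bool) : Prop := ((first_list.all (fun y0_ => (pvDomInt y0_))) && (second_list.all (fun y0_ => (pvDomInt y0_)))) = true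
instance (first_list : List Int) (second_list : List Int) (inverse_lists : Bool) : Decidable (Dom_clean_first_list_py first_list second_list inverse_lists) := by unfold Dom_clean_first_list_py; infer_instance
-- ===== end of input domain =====

-- B replaces A's two-phase group builder + sort/reverse/pop removal with one forward run scan,
-- a removal set and a single enumerate-filter rebuild (simpler); on trailing duplicate runs and
-- runs repeating the previous duplicate run's value A's scanner is wrong (see D_ below).


-- ===== PORT A =====
-- state: (last_value, last_repeated_value, repeated_indexes, temp_index)
def aScanStep (st : Option Int × Option Int × List (List Int) × List Int) (p : Int × Int) :
    Option Int × Option Int × List (List Int) × List Int :=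
  if some p.2 = st.1 then
    if some p.2 = st.2.1 then (some p.2, st.2.1, st.2.2.1, st.2.2.2 ++ [p.1])
    else (some p.2, some p.2, st.2.2.1, st.2.2.2 ++ [p.1 - 1, p.1])
  else
    (some p.2, st.2.1, if st.2.2.2 ≠ [] then st.2.2.1 ++ [st.2.2.2] else st.2.2.1, [])

-- state: (to_remove, max_value, last_index); pyGetD stands for second_list[index] (exact inside Pre_)
def aGroupStep (second : List Int) (inverse : Bool) (st : List Int × Option Int × Option Int)
    (index : Int) : List Int × Option Int × Option Int :=
  match st.2.1 with
  | none => (st.1, some (PySem.List.pyGetD second index 0), some index)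
  | some m =>
    let sv := PySem.List.pyGetD second index 0
    if inverse then
      if sv < m then (st.1 ++ [st.2.2.getD 0], some sv, some index)
      else (st.1 ++ [index], some m, st.2.2)
    else
      if m < sv then (st.1 ++ [st.2.2.getD 0], some sv, some index)
      else (st.1 ++ [index], some m, st.2.2)

-- list.pop(k); out-of-range (impossible inside Pre_) leaves the list unchanged
def aPop (xs : List Int) (k : Int) : List Int := ((PySem.List.pop? xs k).map (·.2)).getD xs

def aRemoveGroup (second : List Int) (inverse : Bool) (cl : List Int × List Int)
    (indexes : List Int) : List Int × List Int :=
  let r := indexes.foldl (aGroupStep second inverse) ([], none, none)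
  let ordered := (PySem.List.sorted r.1 (fun x => x) false).reverse
  ordered.foldl (fun cl k => (aPop cl.1 k, aPop cl.2 k)) cl

def clean_first_list_py (first_list : List Int) (second_list : List Int) (inverse_lists : Bool) :
    List Int × List Int :=
  let fin := (PySem.List.enumerate first_list 0).foldl aScanStep (none, none, [], [])
  fin.2.2.1.reverse.foldl (aRemoveGroup second_list inverse_lists) (first_list, second_list)

-- ===== PORT B =====
-- inner `while j + 1 < n and first_list[j+1] == first_list[i]` (fuel is a totality guard only;
-- fuel = first.length always suffices, the loop advances j each iteration)
def bRunEnd (first : List Int) (v : Int) : Nat → Nat → Nat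
  | 0, j => j
  | fuel + 1, j =>
    if h : j + 1 < first.length then
      if first[j + 1] = v then bRunEnd first v fuel (j + 1) else j
    else j

def bBetter (second : List Int) (inverse : Bool) (b k : Int) : Bool :=
  if inverse then PySem.List.pyGetD second k 0 < PySem.List.pyGetD second b 0
  else PySem.List.pyGetD second b 0 < PySem.List.pyGetD second k 0

def bBest (second : List Int) (inverse : Bool) (i j : Nat) : Int :=
  (PySem.List.pyRange ((i : Int) + 1) ((j : Int) + 1) 1).foldl
    (fun b k => if bBetter second inverse b k then k else b) (i : Int)

-- outer `while i < n` (fuel is a totality guard only; i strictly increases)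
def bRemovalLoop (first second : List Int) (inverse : Bool) :
    Nat → Nat → PySem.Set Int → PySem.Set Int
  | 0, _, removal => removal
  | fuel + 1, i, removal =>
    if h : i < first.length then
      let j := bRunEnd first first[i] first.length i
      let removal' :=
        if i < j then
          PySem.Set.update removal
            ((PySem.List.pyRange (i : Int) ((j : Int) + 1) 1).filter
              (fun k => k ≠ bBest second inverse i j))
        else removal
      bRemovalLoop first second inverse fuel (j + 1) removal'
    else removal

def clean_first_list_py_alt (first_list : List Int) (second_list : List Int)
    (inverse_lists : Bool) : List Int × List Int :=
  let removal := bRemovalLoop first_list second_list inverse_lists first_list.length 0 PySem.Set.empty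
  (((PySem.List.enumerate first_list 0).filter
      (fun p => !(PySem.Set.contains removal p.1))).map (·.2),
   ((PySem.List.enumerate second_list 0).filter
      (fun p => !(PySem.Set.contains removal p.1))).map (·.2))

-- ===== PRECONDITION & SPEC =====
-- Pre_ excludes exactly the inputs where second_list is too short for a duplicate position of
-- first_list: there A raises IndexError on every duplicate run it flushes, and on the remaining
-- (trailing-run) cases A happens to return but B's uniform scan raises IndexError (see cites).
def Pre_clean_first_list_py (first_list : List Int) (second_list : List Int) (inverse_lists : Bool) : Prop :=
  ∀ i < first_list.length, i + 1 < first_list.length →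
    first_list.getD (i + 1) 0 = first_list.getD i 0 → i + 1 < second_list.length

instance (first_list : List Int) (second_list : List Int) (inverse_lists : Bool) :
    Decidable (Pre_clean_first_list_py first_list second_list inverse_lists) := by
  unfold Pre_clean_first_list_py; infer_instance

def pvWitness_clean_first_list_py : List Int × List Int × Bool := ([1, 2, 2, 3], [4, 9, 8, 7], false)

-- On lists whose final run has length ≥ 2 or where two consecutive duplicate runs carry the same
-- value, A never flushes the trailing run (returning its duplicates unremoved) or starts the group
-- one element late because of the stale last_repeated_value (keeping an extra duplicate), while B
-- removes all but the best entry of every duplicate run, which is the function's purpose.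
def D_clean_first_list_py (first_list : List Int) (second_list : List Int) (inverse_lists : Bool) : Prop :=
  (2 ≤ first_list.length ∧
    first_list.getD (first_list.length - 1) 0 = first_list.getD (first_list.length - 2) 0) ∨
  (∃ k < first_list.length, ∃ l < first_list.length, k < l ∧ k + 1 < first_list.length ∧
    l + 1 < first_list.length ∧
    first_list.getD (k + 1) 0 = first_list.getD k 0 ∧
    first_list.getD (l + 1) 0 = first_list.getD l 0 ∧
    first_list.getD k 0 = first_list.getD l 0 ∧
    (∃ m < first_list.length, k < m ∧ m < l ∧ first_list.getD m 0 ≠ first_list.getD k 0) ∧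
    (∀ m < first_list.length, k < m → m < l → m + 1 < first_list.length →
      first_list.getD (m + 1) 0 = first_list.getD m 0 → first_list.getD m 0 = first_list.getD k 0))

instance (first_list : List Int) (second_list : List Int) (inverse_lists : Bool) :
    Decidable (D_clean_first_list_py first_list second_list inverse_lists) := by
  unfold D_clean_first_list_py; infer_instance

def Spec_clean_first_list_py (first_list : List Int) (second_list : List Int) (inverse_lists : Bool)
    (out : List Int × List Int) : Prop :=
  ¬ D_clean_first_list_py first_list second_list inverse_lists →
    out = clean_first_list_py_alt first_list second_list inverse_lists

instance (first_list : List Int) (second_list : List Int) (inverse_lists : Bool)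
    (out : List Int × List Int) : Decidable (Spec_clean_first_list_py first_list second_list inverse_lists out) := by
  unfold Spec_clean_first_list_py; infer_instance

def pvDiffWitness_clean_first_list_py : List Int × List Int × Bool := ([1, 1], [5, 7], false)

def pvDiffWitnessOut_clean_first_list_py : (List Int × List Int) × (List Int × List Int) :=
  (([1, 1], [5, 7]), ([1], [7]))

-- ===== CLAIM (what is proved, stated in full; the proofs are below) =====
def Claim_unchanged_clean_first_list_py : Prop := ∀ (first_list : List Int) (second_list : List Int) (inverse_lists : Bool), Dom_clean_first_list_py first_list second_list inverse_lists → Pre_clean_first_list_py first_list second_list inverse_lists → Spec_clean_first_list_py first_list second_list inverse_lists (clean_first_list_py first_list second_list inverse_lists)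
def Claim_changed_clean_first_list_py : Prop := Dom_clean_first_list_py (pvDiffWitness_clean_first_list_py.1) (pvDiffWitness_clean_first_list_py.2.1) (pvDiffWitness_clean_first_list_py.2.2) ∧ Pre_clean_first_list_py (pvDiffWitness_clean_first_list_py.1) (pvDiffWitness_clean_first_list_py.2.1) (pvDiffWitness_clean_first_list_py.2.2) ∧ D_clean_first_list_py (pvDiffWitness_clean_first_list_py.1) (pvDiffWitness_clean_first_list_py.2.1) (pvDiffWitness_clean_first_list_py.2.2) ∧ clean_first_list_py (pvDiffWitness_clean_first_list_py.1) (pvDiffWitness_clean_first_list_py.2.1) (pvDiffWitness_clean_first_list_py.2.2) = pvDiffWitnessOut_clean_first_list_py.1 ∧ clean_first_list_py_alt (pvDiffWitness_clean_first_list_py.1) (pvDiffWitness_clean_first_list_py.2.1) (pvDiffWitness_clean_first_list_py.2.2) = pvDiffWitnessOut_clean_first_list_py.2 ∧ pvDiffWitnessOut_clean_first_list_py.1 ≠ pvDiffWitnessOut_clean_first_list_py.2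

def Claim_exact_clean_first_list_py : Prop := ∀ (first_list : List Int) (second_list : List Int) (inverse_lists : Bool), Dom_clean_first_list_py first_list second_list inverse_lists → Pre_clean_first_list_py first_list second_list inverse_lists → D_clean_first_list_py first_list second_list inverse_lists → clean_first_list_py first_list second_list inverse_lists ≠ clean_first_list_py_alt first_list second_list inverse_lists

-- ===== LEMMAS AND PROOFS =====

-- ---- facts about bRunEnd (B's inner while loop) ----
theorem bRunEnd_le (first : List Int) (v : Int) (fuel : Nat) : ∀ j, j ≤ bRunEnd first v fuel j := by
  induction fuel with
  | zero => intro j; simp [bRunEnd]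
  | succ fuel ih =>
    intro j
    simp only [bRunEnd]
    split
    · split
      · exact le_trans (by omega) (ih (j + 1))
      · exact le_refl j
    · exact le_refl j

theorem bRunEnd_spec (first : List Int) (v : Int) (fuel : Nat) :
    ∀ j, first.length ≤ fuel + j →
      (j < first.length → bRunEnd first v fuel j < first.length) ∧
      (∀ k, j < k → k ≤ bRunEnd first v fuel j → first.getD k 0 = v) ∧
      (bRunEnd first v fuel j + 1 < first.length → first.getD (bRunEnd first v fuel j + 1) 0 ≠ v) := by
  induction fuel with
  | zero =>
    intro j hj
    refine ⟨by omega, by intro k h1 h2; simp [bRunEnd] at h2; omega, by intro h; simp [bRunEnd] at h ⊢; omega⟩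
  | succ fuel ih =>
    intro j hj
    simp only [bRunEnd]
    split
    · rename_i h1
      split
      · rename_i h2
        obtain ⟨c1, c2, c3⟩ := ih (j + 1) (by omega)
        refine ⟨fun _ => c1 (by omega), ?_, c3⟩
        intro k hk1 hk2
        rcases Nat.lt_or_ge j.succ k with hk | hk
        · exact c2 k hk hk2
        · have : k = j + 1 := by omega
          subst this
          rw [List.getD_eq_getElem _ _ h1]
          exact h2
      · rename_i h2
        refine ⟨fun h => by omega, by intro k h1 h2; omega, ?_⟩
        intro h
        rw [List.getD_eq_getElem _ _ h]
        exact h2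
    · rename_i h1
      refine ⟨fun h => by omega, by intro k hk1 hk2; omega, by intro h; omega⟩

-- run end, with full fuel
def pvJ (first : List Int) (i : Nat) : Nat := bRunEnd first (first.getD i 0) first.length i

theorem pvJ_ge (first : List Int) (i : Nat) : i ≤ pvJ first i :=
  bRunEnd_le first (first.getD i 0) first.length i

theorem pvJ_lt (first : List Int) {i : Nat} (h : i < first.length) : pvJ first i < first.length :=
  (bRunEnd_spec first (first.getD i 0) first.length i (by omega)).1 h

theorem pvJ_run (first : List Int) {i : Nat} (h : i < first.length) :
    ∀ k, i ≤ k → k ≤ pvJ first i → first.getD k 0 = first.getD i 0 := by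
  intro k hik hk
  rcases Nat.eq_or_lt_of_le hik with rfl | hlt
  · rfl
  · exact (bRunEnd_spec first (first.getD i 0) first.length i (by omega)).2.1 k hlt hk

theorem pvJ_stop (first : List Int) (i : Nat) (h : pvJ first i + 1 < first.length) :
    first.getD (pvJ first i + 1) 0 ≠ first.getD i 0 :=
  (bRunEnd_spec first (first.getD i 0) first.length i (by omega)).2.2 h

-- the maximal runs of length ≥ 2, as (start, end) index pairs
def pvGrps (first : List Int) (i : Nat) : List (Nat × Nat) :=
  if h : i < first.length then
    (if i < pvJ first i then [(i, pvJ first i)] else []) ++ pvGrps first (pvJ first i + 1)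
  else []
termination_by first.length - i
decreasing_by have := pvJ_ge first i; omega

-- step function of both argmax folds
def pvStep (second : List Int) (inverse : Bool) : Int → Int → Int :=
  fun b k => if bBetter second inverse b k then k else b

-- ascending removal indices of one duplicate run
def pvAsc (second : List Int) (inverse : Bool) (g : Nat × Nat) : List Int :=
  (PySem.List.pyRange (g.1 : Int) ((g.2 : Int) + 1)).filter
    (fun k => k ≠ bBest second inverse g.1 g.2)

-- all removal indices from position i on, ascending
def pvRem (first second : List Int) (inverse : Bool) (i : Nat) : List Int :=
  (pvGrps first i).flatMap (pvAsc second inverse)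

def pvPopAll (xs : List Int) (K : List Int) : List Int := K.foldl aPop xs

-- ---- part 1: characterising A's scan ----

-- what A's last_repeated_value can be: value of the most recent duplicate run before i
def lrvInv (first : List Int) (i : Nat) (lrv : Option Int) : Prop :=
  ∀ w, lrv = some w → ∃ k, k + 1 < i ∧ k + 1 < first.length ∧ first.getD k 0 = w ∧
    first.getD (k + 1) 0 = w ∧
    ∀ m, k < m → m + 1 < i → first.getD (m + 1) 0 = first.getD m 0 → first.getD m 0 = w

-- the second disjunct of D_ (the stale last_repeated_value quirk), as its own Prop
def pvQuirk (first : List Int) : Prop :=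
  ∃ k < first.length, ∃ l < first.length, k < l ∧ k + 1 < first.length ∧
    l + 1 < first.length ∧
    first.getD (k + 1) 0 = first.getD k 0 ∧
    first.getD (l + 1) 0 = first.getD l 0 ∧
    first.getD k 0 = first.getD l 0 ∧
    (∃ m < first.length, k < m ∧ m < l ∧ first.getD m 0 ≠ first.getD k 0) ∧
    (∀ m < first.length, k < m → m < l → m + 1 < first.length →
      first.getD (m + 1) 0 = first.getD m 0 → first.getD m 0 = first.getD k 0)

theorem quirk_contra (first : List Int) (hQ : ¬ pvQuirk first) {i : Nat} (hi : i + 1 < first.length)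
    (hdup : first.getD (i + 1) 0 = first.getD i 0)
    (hrs : i = 0 ∨ first.getD (i - 1) 0 ≠ first.getD i 0)
    {lrv : Option Int} (hlrv : lrvInv first i lrv) (heq : lrv = some (first.getD i 0)) : False := by
  obtain ⟨k, hk1, hk2, hk3, hk4, hk5⟩ := hlrv _ heq
  rcases hrs with rfl | hrs
  · omega
  · refine hQ ⟨k, by omega, i, by omega, by omega, by omega, hi, by rw [hk3, hk4], hdup, ?_, ?_, ?_⟩
    · rw [hk3]
    · exact ⟨i - 1, by omega, by omega, by omega, by rw [hk3]; exact fun h => hrs h⟩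
    · intro m _ hm1 hm2 _ hm4
      rcases Nat.lt_or_ge (m + 1) i with hmi | hmi
      · rw [hk3]; exact hk5 m hm1 hmi hm4
      · have : m + 1 = i := by omega
        exfalso; apply hrs
        rw [← this, hm4]; congr 1

theorem lrvInv_succ (first : List Int) {i : Nat} {lrv : Option Int} (h : lrvInv first i lrv)
    (hrs : i = 0 ∨ first.getD (i - 1) 0 ≠ first.getD i 0) : lrvInv first (i + 1) lrv := by
  intro w hw
  obtain ⟨k, hk1, hk2, hk3, hk4, hk5⟩ := h w hw
  refine ⟨k, by omega, hk2, hk3, hk4, ?_⟩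
  intro m hm1 hm2 hm3
  rcases Nat.lt_or_ge (m + 1) i with hmi | hmi
  · exact hk5 m hm1 hmi hm3
  · have hmeq : m + 1 = i := by omega
    exfalso
    rcases hrs with rfl | hrs
    · omega
    · apply hrs
      rw [← hmeq, hm3]; congr 1

theorem lrvInv_run (first : List Int) {i j : Nat} (hij : i < j) (hj : j < first.length)
    (hrun : ∀ k, i ≤ k → k ≤ j → first.getD k 0 = first.getD i 0) :
    lrvInv first (j + 1) (some (first.getD i 0)) := by
  intro w hw
  injection hw with hw
  refine ⟨j - 1, by omega, by omega, ?_, ?_, ?_⟩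
  · rw [← hw]; exact hrun (j - 1) (by omega) (by omega)
  · rw [← hw]; have : j - 1 + 1 = j := by omega
    rw [this]; exact hrun j (by omega) (by omega)
  · intro m hm1 hm2; omega

-- continuing inside a run once last_value = last_repeated_value = v
theorem scan_mid (v : Int) (lv2 : Option Int) (rep : List (List Int)) :
    ∀ (c : Nat) (s : Int) (temp : List Int), lv2 = some v →
      (PySem.List.enumerate (List.replicate c v) s).foldl aScanStep (some v, lv2, rep, temp) =
        (some v, some v, rep, temp ++ PySem.List.pyRange s (s + c)) := by
  intro c
  induction c with
  | zero =>
    intro s temp h; subst h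
    simp [PySem.List.enumerate_nil]
  | succ c ih =>
    intro s temp h; subst h
    rw [List.replicate_succ, PySem.List.enumerate_cons, List.foldl_cons]
    have hstep : aScanStep (some v, some v, rep, temp) (s, v) = (some v, some v, rep, temp ++ [s]) := by
      simp [aScanStep]
    rw [hstep, ih _ _ rfl, List.append_assoc]
    have h1 : s < s + (((c : Nat) + 1 : Nat) : Int) := by push_cast; omega
    rw [PySem.List.pyRange_one_cons h1]
    have h2 : s + 1 + ((c : Nat) : Int) = s + (((c : Nat) + 1 : Nat) : Int) := by push_cast; ring
    rw [h2]
    rfl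

theorem scan_flush (lv lrv : Option Int) (rep : List (List Int)) (temp : List Int)
    (s v : Int) (hlv : lv ≠ some v) :
    aScanStep (lv, lrv, rep, temp) (s, v)
      = (some v, lrv, rep ++ (if temp.isEmpty then [] else [temp]), []) := by
  unfold aScanStep
  rw [if_neg (fun hh => hlv hh.symm)]
  cases temp <;> simp

theorem scan_dup2 (lrv : Option Int) (rep : List (List Int)) (s v : Int) (hlrv : lrv ≠ some v) :
    aScanStep (some v, lrv, rep, []) (s, v) = (some v, some v, rep, [s - 1, s]) := by
  unfold aScanStep
  rw [if_pos rfl, if_neg (fun hh => hlrv hh.symm)]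
  rfl

theorem scan_from (first : List Int) (hT : ¬ (2 ≤ first.length ∧
      first.getD (first.length - 1) 0 = first.getD (first.length - 2) 0))
    (hQ : ¬ pvQuirk first) :
    ∀ (fuel i : Nat) (lv lrv : Option Int) (rep : List (List Int)) (temp : List Int),
      first.length - i ≤ fuel →
      (i < first.length → lv ≠ some (first.getD i 0)) →
      (i < first.length → i = 0 ∨ first.getD (i - 1) 0 ≠ first.getD i 0) →
      (temp = [] ∨ i < first.length) →
      lrvInv first i lrv →
      ∃ lv' lrv' temp',
        (PySem.List.enumerate (first.drop i) i).foldl aScanStep (lv, lrv, rep, temp) =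
          (lv', lrv',
            (rep ++ if temp.isEmpty then [] else [temp]) ++
              (pvGrps first i).map (fun g => PySem.List.pyRange (g.1 : Int) ((g.2 : Int) + 1)),
            temp') := by
  intro fuel
  induction fuel with
  | zero =>
    intro i lv lrv rep temp hn hlv hrs htemp hlrv
    have hge : first.length ≤ i := by omega
    rcases htemp with rfl | hlt
    · refine ⟨lv, lrv, [], ?_⟩
      rw [pvGrps, dif_neg (by omega), List.drop_eq_nil_of_le hge]
      simp [PySem.List.enumerate_nil]
    · omega
  | succ fuel ih =>
    intro i lv lrv rep temp hn hlv hrs htemp hlrv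
    by_cases h : i < first.length
    case neg =>
      have hge : first.length ≤ i := by omega
      rcases htemp with rfl | hlt
      · refine ⟨lv, lrv, [], ?_⟩
        rw [pvGrps, dif_neg (by omega), List.drop_eq_nil_of_le hge]
        simp [PySem.List.enumerate_nil]
      · omega
    case pos =>
    have hge : i ≤ pvJ first i := pvJ_ge first i
    have hjlt : pvJ first i < first.length := pvJ_lt first h
    have hrun : ∀ k, i ≤ k → k ≤ pvJ first i → first.getD k 0 = first.getD i 0 := pvJ_run first h
    have hstop : pvJ first i + 1 < first.length →
        first.getD (pvJ first i + 1) 0 ≠ first.getD i 0 := pvJ_stop first i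
    have hchunk : first.drop i
        = List.replicate (pvJ first i + 1 - i) (first.getD i 0) ++ first.drop (pvJ first i + 1) := by
      conv_lhs => rw [← List.take_append_drop (pvJ first i + 1 - i) (first.drop i)]
      congr 1
      · apply List.ext_getElem
        · simp [List.length_take, List.length_drop]
          omega
        · intro n h1 h2
          rw [List.getElem_take, List.getElem_drop, List.getElem_replicate]
          have hlen1 : (List.take (pvJ first i + 1 - i) (first.drop i)).length
              = pvJ first i + 1 - i := by simp [List.length_take, List.length_drop]; omega
          rw [hlen1] at h1
          have := hrun (i + n) (by omega) (by omega)
          rw [List.getD_eq_getElem _ _ (by omega : i + n < first.length)] at this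
          exact this
      · rw [List.drop_drop]
        congr 1
        omega
    rw [hchunk, PySem.List.enumerate_append, List.foldl_append, List.length_replicate]
    have hs2 : (i : Int) + ((pvJ first i + 1 - i : Nat) : Int) = ((pvJ first i + 1 : Nat) : Int) := by
      omega
    rw [hs2]
    rcases Nat.eq_or_lt_of_le hge with heq | hij
    · -- singleton run
      have hrep1 : pvJ first i + 1 - i = 1 := by omega
      rw [hrep1]
      have hfold1 : (PySem.List.enumerate (List.replicate 1 (first.getD i 0)) i).foldl aScanStep
            (lv, lrv, rep, temp)
          = (some (first.getD i 0), lrv, rep ++ (if temp.isEmpty then [] else [temp]), []) := by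
        rw [show List.replicate 1 (first.getD i 0) = [first.getD i 0] from rfl,
          PySem.List.enumerate_cons, PySem.List.enumerate_nil, List.foldl_cons, List.foldl_nil,
          scan_flush _ _ _ _ _ _ (hlv h)]
      rw [hfold1]
      have hnext : pvJ first i + 1 = i + 1 := by omega
      rw [hnext]
      obtain ⟨lv', lrv', temp', hres⟩ := ih (i + 1) (some (first.getD i 0)) lrv
        (rep ++ (if temp.isEmpty then [] else [temp])) [] (by omega)
        (by
          intro hi1
          intro hc
          injection hc with hc
          have := hstop (by omega)
          rw [hnext] at this
          exact this hc.symm)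
        (by
          intro hi1
          right
          have := hstop (by omega)
          rw [hnext] at this
          simpa using fun hh => this hh.symm)
        (Or.inl rfl)
        (lrvInv_succ first hlrv (hrs h))
      refine ⟨lv', lrv', temp', ?_⟩
      rw [hres]
      conv_rhs => rw [pvGrps, dif_pos h, if_neg (by omega : ¬ i < pvJ first i)]
      rw [← heq]
      simp [List.append_assoc]
    · -- duplicate run
      have hlrvne : lrv ≠ some (first.getD i 0) := by
        intro hc
        exact quirk_contra first hQ (by omega)
          (by
            have := hrun (i + 1) (by omega) (by omega)
            exact this)
          (hrs h) hlrv hc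
      have hrep2 : pvJ first i + 1 - i = (pvJ first i - i - 1) + 2 := by omega
      rw [hrep2, List.replicate_succ, List.replicate_succ, PySem.List.enumerate_cons,
        PySem.List.enumerate_cons, List.foldl_cons, List.foldl_cons,
        scan_flush _ _ _ _ _ _ (hlv h), scan_dup2 _ _ _ _ hlrvne,
        scan_mid (first.getD i 0) (some (first.getD i 0))
          (rep ++ (if temp.isEmpty then [] else [temp])) (pvJ first i - i - 1) ((i : Int) + 1 + 1)
          [(i : Int) + 1 - 1, (i : Int) + 1] rfl]
      have htempeq : [(i : Int) + 1 - 1, (i : Int) + 1] ++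
            PySem.List.pyRange ((i : Int) + 1 + 1) ((i : Int) + 1 + 1 + ((pvJ first i - i - 1 : Nat) : Int))
          = PySem.List.pyRange (i : Int) ((pvJ first i : Int) + 1) := by
        rw [PySem.List.pyRange_one_cons (by omega : (i : Int) < (pvJ first i : Int) + 1),
          PySem.List.pyRange_one_cons (by omega : (i : Int) + 1 < (pvJ first i : Int) + 1)]
        have e1 : (i : Int) + 1 - 1 = (i : Int) := by ring
        have e2 : (i : Int) + 1 + 1 + ((pvJ first i - i - 1 : Nat) : Int) = (pvJ first i : Int) + 1 := by
          omega
        rw [e1, e2]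
        rfl
      rw [htempeq]
      have hj1lt : pvJ first i + 1 < first.length := by
        rcases Nat.lt_or_ge (pvJ first i + 1) first.length with hlt | hge2
        · exact hlt
        · exfalso
          apply hT
          have hlen2 : first.length = pvJ first i + 1 := by omega
          constructor
          · omega
          · rw [hlen2]
            have ha : first.getD (pvJ first i) 0 = first.getD i 0 := hrun _ (by omega) (by omega)
            have hb : first.getD (pvJ first i - 1) 0 = first.getD i 0 := hrun _ (by omega) (by omega)
            have hc1 : pvJ first i + 1 - 1 = pvJ first i := by omega
            have hc2 : pvJ first i + 1 - 2 = pvJ first i - 1 := by omega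
            rw [hc1, hc2, ha, hb]
      obtain ⟨lv', lrv', temp', hres⟩ := ih (pvJ first i + 1) (some (first.getD i 0))
        (some (first.getD i 0)) (rep ++ (if temp.isEmpty then [] else [temp]))
        (PySem.List.pyRange (i : Int) ((pvJ first i : Int) + 1)) (by omega)
        (by
          intro _
          intro hc
          injection hc with hc
          exact (hstop hj1lt) hc.symm)
        (by
          intro _
          right
          have := hstop hj1lt
          have hd : first.getD (pvJ first i + 1 - 1) 0 = first.getD i 0 := by
            have hc1 : pvJ first i + 1 - 1 = pvJ first i := by omega
            rw [hc1]
            exact hrun _ (by omega) (by omega)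
          rw [hd]
          exact fun hh => this hh.symm)
        (Or.inr hj1lt)
        (lrvInv_run first hij hjlt hrun)
      refine ⟨lv', lrv', temp', ?_⟩
      rw [hres]
      have hne : (PySem.List.pyRange (i : Int) ((pvJ first i : Int) + 1)).isEmpty = false := by
        rw [PySem.List.pyRange_one_cons (by omega : (i : Int) < (pvJ first i : Int) + 1)]
        rfl
      rw [hne]
      conv_rhs => rw [pvGrps, dif_pos h, if_pos hij]
      simp [List.append_assoc]

-- ---- part 2: characterising A's per-group removal ----

theorem groupFold_inv (second : List Int) (inverse : Bool) :
    ∀ (ks : List Int) (tr : List Int) (b : Int),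
      ∃ tr', ks.foldl (aGroupStep second inverse) (tr, some (PySem.List.pyGetD second b 0), some b) =
          (tr', some (PySem.List.pyGetD second (ks.foldl (pvStep second inverse) b) 0),
            some (ks.foldl (pvStep second inverse) b)) ∧
        (tr' ++ [ks.foldl (pvStep second inverse) b]).Perm (tr ++ b :: ks) := by
  intro ks
  induction ks with
  | nil => exact fun tr b => ⟨tr, by simp, by simp⟩
  | cons k ks ih =>
    intro tr b
    rw [List.foldl_cons, List.foldl_cons]
    by_cases hbb : bBetter second inverse b k
    · have hstep : aGroupStep second inverse (tr, some (PySem.List.pyGetD second b 0), some b) k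
          = (tr ++ [b], some (PySem.List.pyGetD second k 0), some k) := by
        cases inverse <;> simp_all [aGroupStep, bBetter]
      obtain ⟨tr', h1, h2⟩ := ih (tr ++ [b]) k
      rw [hstep, show pvStep second inverse b k = k by simp [pvStep, hbb]]
      exact ⟨tr', h1, by simpa using h2⟩
    · have hstep : aGroupStep second inverse (tr, some (PySem.List.pyGetD second b 0), some b) k
          = (tr ++ [k], some (PySem.List.pyGetD second b 0), some b) := by
        cases inverse <;> simp_all [aGroupStep, bBetter]
      obtain ⟨tr', h1, h2⟩ := ih (tr ++ [k]) b
      rw [hstep, show pvStep second inverse b k = b by simp [pvStep, hbb]]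
      refine ⟨tr', h1, ?_⟩
      refine h2.trans ?_
      have : (tr ++ [k]) ++ b :: ks = tr ++ k :: b :: ks := by simp
      rw [this]
      exact (List.Perm.swap b k ks).append_left tr

theorem removeGroup_eq (second : List Int) (inverse : Bool) (a b : Nat) (hab : a ≤ b)
    (cl : List Int × List Int) :
    aRemoveGroup second inverse cl (PySem.List.pyRange (a : Int) ((b : Int) + 1)) =
      (pvPopAll cl.1 (pvAsc second inverse (a, b)).reverse,
       pvPopAll cl.2 (pvAsc second inverse (a, b)).reverse) := by
  have hab' : (a : Int) < (b : Int) + 1 := by omega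
  unfold aRemoveGroup
  rw [PySem.List.pyRange_one_cons hab', List.foldl_cons]
  have hstep : aGroupStep second inverse ([], none, none) (a : Int)
      = ([], some (PySem.List.pyGetD second (a : Int) 0), some (a : Int)) := by
    simp [aGroupStep]
  rw [hstep]
  obtain ⟨tr', h1, h2⟩ :=
    groupFold_inv second inverse (PySem.List.pyRange ((a : Int) + 1) ((b : Int) + 1)) [] (a : Int)
  rw [h1]
  have hbest : (PySem.List.pyRange ((a : Int) + 1) ((b : Int) + 1)).foldl (pvStep second inverse) (a : Int)
      = bBest second inverse a b := rfl
  rw [hbest] at h2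
  have hperm : (tr' ++ [bBest second inverse a b]).Perm (PySem.List.pyRange (a : Int) ((b : Int) + 1)) := by
    rw [PySem.List.pyRange_one_cons hab']
    simpa using h2
  have hnd : (tr' ++ [bBest second inverse a b]).Nodup :=
    hperm.nodup_iff.mpr (PySem.List.nodup_pyRange_one _ _)
  have hnotmem : bBest second inverse a b ∉ tr' := by
    rcases List.nodup_append.mp hnd with ⟨_, _, hdisj⟩
    intro hmem
    exact hdisj _ hmem _ (List.mem_singleton_self _) rfl
  have htr' : tr'.Perm ((PySem.List.pyRange (a : Int) ((b : Int) + 1)).erase (bBest second inverse a b)) := by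
    have := hperm.erase (bBest second inverse a b)
    rw [List.erase_append_right _ hnotmem, List.erase_cons_head, List.append_nil] at this
    exact this
  have herase : (PySem.List.pyRange (a : Int) ((b : Int) + 1)).erase (bBest second inverse a b)
      = pvAsc second inverse (a, b) := by
    rw [(PySem.List.nodup_pyRange_one _ _).erase_eq_filter]
    unfold pvAsc
    exact List.filter_congr (by intro x _; by_cases h : x = bBest second inverse a b <;> simp [h])
  rw [herase] at htr'
  have hsorted : PySem.List.sorted tr' (fun x => x) = pvAsc second inverse (a, b) := by
    refine PySem.List.sorted_eq_of_perm_of_pairwise_lt _ _ _ htr'.symm ?_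
    exact (PySem.List.pairwise_lt_pyRange_one _ _).filter _
  show (List.foldl (fun cl k => (aPop cl.1 k, aPop cl.2 k)) cl
      ((PySem.List.sorted tr' (fun x => x)).reverse)) = _
  rw [hsorted, PySem.List.foldl_prod_mk (f := aPop) (g := aPop)]
  rfl

theorem removeFold (second0 : List Int) (inverse : Bool) :
    ∀ (gs : List (Nat × Nat)), (∀ g ∈ gs, g.1 ≤ g.2) → ∀ (cl : List Int × List Int),
      ((gs.map fun g => PySem.List.pyRange (g.1 : Int) ((g.2 : Int) + 1)).reverse).foldl
          (aRemoveGroup second0 inverse) cl =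
        (pvPopAll cl.1 (gs.flatMap (pvAsc second0 inverse)).reverse,
         pvPopAll cl.2 (gs.flatMap (pvAsc second0 inverse)).reverse) := by
  intro gs
  induction gs with
  | nil => intro _ cl; simp [pvPopAll]
  | cons g gs ih =>
    intro hgs cl
    rw [List.map_cons, List.reverse_cons, List.foldl_append, ih (fun g hg => hgs g (List.mem_cons_of_mem _ hg)) cl]
    rw [List.foldl_cons, List.foldl_nil]
    have hg : g.1 ≤ g.2 := hgs g List.mem_cons_self
    have := removeGroup_eq second0 inverse g.1 g.2 hg
      (pvPopAll cl.1 (gs.flatMap (pvAsc second0 inverse)).reverse,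
       pvPopAll cl.2 (gs.flatMap (pvAsc second0 inverse)).reverse)
    simp only at this
    rw [this]
    rw [List.flatMap_cons, List.reverse_append]
    unfold pvPopAll
    rw [List.foldl_append, List.foldl_append]

-- ---- part 3: pops of a descending index list are an index filter ----

theorem aPop_in (xs : List Int) (k : Nat) (hk : k < xs.length) :
    aPop xs (k : Int) = xs.eraseIdx k := by
  unfold aPop
  rw [PySem.List.pop?_natCast xs k hk]
  rfl

theorem aPop_out (xs : List Int) (k : Int) (h0 : 0 ≤ k) (hk : (xs.length : Int) ≤ k) :
    aPop xs k = xs := by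
  unfold aPop PySem.List.pop? PySem.List.pyIdx?
  simp [show ¬ k < (xs.length : Int) by omega, h0]

-- a chunk of enumerate whose start exceeds every entry of L is kept whole by the filter
theorem pvKeepAll (ys : List Int) (s : Int) (L : List Int) (hL : ∀ x ∈ L, x < s) :
    ((PySem.List.enumerate ys s).filter (fun p => decide (p.1 ∉ L))).map (·.2) = ys := by
  rw [List.filter_eq_self.mpr, PySem.List.map_snd_enumerate]
  intro p hp
  obtain ⟨m, hm, rfl⟩ := (PySem.List.mem_enumerate_iff _ _ p).mp hp
  simp only [decide_eq_true_eq]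
  intro hmem
  have := hL _ hmem
  omega

theorem pvFilterStep (xs : List Int) (K : List Int) (k : Nat) (hk : k < xs.length)
    (hK : ∀ x ∈ K, x < (k : Int)) :
    ((PySem.List.enumerate (xs.eraseIdx k) 0).filter (fun p => decide (p.1 ∉ K))).map (·.2)
      = ((PySem.List.enumerate xs 0).filter (fun p => decide (p.1 ∉ (k : Int) :: K))).map (·.2) := by
  have hlen : (xs.take k).length = k := by simp; omega
  have hsplit : xs = xs.take k ++ xs[k] :: xs.drop (k + 1) := by
    conv_lhs => rw [← List.take_append_drop k xs, List.drop_eq_getElem_cons hk]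
  conv_rhs => rw [hsplit]
  rw [List.eraseIdx_eq_take_drop_succ, PySem.List.enumerate_append, hlen, List.filter_append,
    List.map_append,
    pvKeepAll (xs.drop (k + 1)) (0 + (k : Int)) K (fun x hx => by have := hK x hx; omega)]
  rw [PySem.List.enumerate_append, hlen, PySem.List.enumerate_cons, List.filter_append,
    List.filter_cons, List.map_append]
  rw [if_neg (by simp)]
  rw [pvKeepAll (xs.drop (k + 1)) (0 + (k : Int) + 1) ((k : Int) :: K)
    (by
      intro x hx
      rcases List.mem_cons.mp hx with rfl | hx'
      · omega
      · have := hK x hx'; omega)]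
  congr 2
  refine List.filter_congr ?_
  intro p hp
  obtain ⟨m, hm, rfl⟩ := (PySem.List.mem_enumerate_iff _ _ p).mp hp
  rw [hlen] at hm
  have hne : (0 : Int) + (m : Int) ≠ (k : Int) := by omega
  simp only [List.mem_cons, decide_eq_decide]
  tauto

theorem popAll_eq_filter :
    ∀ (K : List Int) (xs : List Int), K.Pairwise (· > ·) → (∀ k ∈ K, 0 ≤ k) →
      pvPopAll xs K =
        ((PySem.List.enumerate xs 0).filter (fun p => decide (p.1 ∉ K))).map (·.2) := by
  intro K
  induction K with
  | nil =>
    intro xs _ _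
    simp [pvPopAll, PySem.List.map_snd_enumerate]
  | cons k K ih =>
    intro xs hpw h0
    obtain ⟨hK', hpw'⟩ := List.pairwise_cons.mp hpw
    have hK : ∀ x ∈ K, x < k := hK'
    have hk0 : 0 ≤ k := h0 k List.mem_cons_self
    have h0' : ∀ x ∈ K, (0 : Int) ≤ x := fun x hx => h0 x (List.mem_cons_of_mem _ hx)
    unfold pvPopAll
    rw [List.foldl_cons]
    by_cases hin : k.toNat < xs.length
    · have hkc : (k.toNat : Int) = k := Int.toNat_of_nonneg hk0
      have h1 : aPop xs k = xs.eraseIdx k.toNat := by rw [← hkc]; exact aPop_in xs k.toNat hin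
      rw [h1]
      have h2 := ih (xs.eraseIdx k.toNat) hpw' h0'
      unfold pvPopAll at h2
      rw [h2, pvFilterStep xs K k.toNat hin (by intro x hx; rw [hkc]; exact hK x hx), hkc]
    · replace hin := Nat.le_of_not_lt hin
      rw [aPop_out xs k hk0 (by omega)]
      have h2 := ih xs hpw' h0'
      unfold pvPopAll at h2
      rw [h2]
      congr 1
      refine List.filter_congr ?_
      intro p hp
      obtain ⟨m, hm, rfl⟩ := (PySem.List.mem_enumerate_iff _ _ p).mp hp
      have hne : (0 : Int) + (m : Int) ≠ k := by omega
      simp only [List.mem_cons, decide_eq_decide]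
      tauto

-- ---- part 4: bounds and ordering of the removal indices ----

theorem pvGrps_mem (first : List Int) :
    ∀ (i : Nat) (g : Nat × Nat), g ∈ pvGrps first i → i ≤ g.1 ∧ g.1 < g.2 ∧ g.2 < first.length := by
  have aux : ∀ (n i : Nat), first.length - i ≤ n →
      ∀ g ∈ pvGrps first i, i ≤ g.1 ∧ g.1 < g.2 ∧ g.2 < first.length := by
    intro n
    induction n with
    | zero =>
      intro i hn g hg
      rw [pvGrps, dif_neg (by omega)] at hg
      simp at hg
    | succ n ih =>
      intro i hn g hg
      rw [pvGrps] at hg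
      by_cases h : i < first.length
      · rw [dif_pos h] at hg
        have hge := pvJ_ge first i
        have hlt := pvJ_lt first h
        rcases List.mem_append.mp hg with h1 | h1
        · by_cases hij : i < pvJ first i
          · rw [if_pos hij] at h1
            simp at h1
            subst h1
            exact ⟨le_refl _, hij, hlt⟩
          · rw [if_neg hij] at h1; simp at h1
        · obtain ⟨hg1, hg2, hg3⟩ := ih (pvJ first i + 1) (by omega) g h1
          exact ⟨by omega, hg2, hg3⟩
      · rw [dif_neg h] at hg; simp at hg
  exact fun i => aux (first.length - i) i le_rfl

theorem pvAsc_bounds (second : List Int) (inverse : Bool) (g : Nat × Nat) :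
    ∀ x ∈ pvAsc second inverse g, (g.1 : Int) ≤ x ∧ x ≤ (g.2 : Int) := by
  intro x hx
  unfold pvAsc at hx
  have := PySem.List.mem_pyRange_one.mp (List.mem_of_mem_filter hx)
  omega

theorem pvRem_lb (first second : List Int) (inverse : Bool) :
    ∀ (i : Nat) (x : Int), x ∈ pvRem first second inverse i → (i : Int) ≤ x := by
  intro i x hx
  obtain ⟨g, hg, hxg⟩ := List.mem_flatMap.mp hx
  have h1 := (pvGrps_mem first i g hg).1
  have h2 := (pvAsc_bounds second inverse g x hxg).1
  omega

theorem pvRem_pairwise (first second : List Int) (inverse : Bool) :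
    ∀ (i : Nat), (pvRem first second inverse i).Pairwise (· < ·) := by
  have aux : ∀ (n i : Nat), first.length - i ≤ n → (pvRem first second inverse i).Pairwise (· < ·) := by
    intro n
    induction n with
    | zero =>
      intro i hn
      unfold pvRem
      rw [pvGrps, dif_neg (by omega)]
      simp
    | succ n ih =>
      intro i hn
      unfold pvRem
      rw [pvGrps]
      by_cases h : i < first.length
      · rw [dif_pos h]
        have hge := pvJ_ge first i
        have hlt := pvJ_lt first h
        rw [List.flatMap_append]
        have htail : (pvRem first second inverse (pvJ first i + 1)).Pairwise (· < ·) :=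
          ih (pvJ first i + 1) (by omega)
        by_cases hij : i < pvJ first i
        · rw [if_pos hij]
          rw [List.pairwise_append]
          refine ⟨?_, ?_, ?_⟩
          · simp only [List.flatMap_cons, List.flatMap_nil, List.append_nil]
            exact (PySem.List.pairwise_lt_pyRange_one _ _).filter _
          · exact htail
          · intro x hx y hy
            simp only [List.flatMap_cons, List.flatMap_nil, List.append_nil] at hx
            have h1 := (pvAsc_bounds second inverse (i, pvJ first i) x hx).2
            have h2 := pvRem_lb first second inverse (pvJ first i + 1) y hy
            simp at h1
            omega
        · rw [if_neg hij]
          simpa using htail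
      · rw [dif_neg h]; simp
  exact fun i => aux (first.length - i) i le_rfl

-- ---- part 5: B's removal loop collects exactly pvRem ----

theorem bLoop_mem (first second : List Int) (inverse : Bool) :
    ∀ (fuel i : Nat) (s : PySem.Set Int), first.length - i ≤ fuel →
      ∀ x, x ∈ bRemovalLoop first second inverse fuel i s ↔
        x ∈ s ∨ x ∈ pvRem first second inverse i := by
  intro fuel
  induction fuel with
  | zero =>
    intro i s hn x
    simp only [bRemovalLoop]
    unfold pvRem
    rw [pvGrps, dif_neg (by omega)]
    simp
  | succ fuel ih =>
    intro i s hn x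
    simp only [bRemovalLoop]
    by_cases h : i < first.length
    · rw [dif_pos h]
      have hJe : bRunEnd first first[i] first.length i = pvJ first i := by
        unfold pvJ
        rw [List.getD_eq_getElem _ _ h]
      simp only [hJe]
      have hge := pvJ_ge first i
      have hlt := pvJ_lt first h
      rw [ih (pvJ first i + 1) _ (by omega) x]
      have hrem : pvRem first second inverse i =
          (if i < pvJ first i then pvAsc second inverse (i, pvJ first i) else []) ++
            pvRem first second inverse (pvJ first i + 1) := by
        unfold pvRem
        rw [pvGrps, dif_pos h, List.flatMap_append]
        by_cases hij : i < pvJ first i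
        · simp [hij]
        · simp [hij]
      rw [hrem]
      by_cases hij : i < pvJ first i
      · rw [if_pos hij, if_pos hij, PySem.Set.mem_update]
        simp only [List.mem_append]
        have hasc : ((PySem.List.pyRange (i : Int) ((pvJ first i : Int) + 1)).filter
            (fun k => k ≠ bBest second inverse i (pvJ first i))) = pvAsc second inverse (i, pvJ first i) := rfl
        rw [hasc]
        tauto
      · rw [if_neg hij, if_neg hij]
        simp
    · rw [dif_neg h]
      unfold pvRem
      rw [pvGrps, dif_neg h]
      simp


-- ---- part 6: exact characterisation of A's scan on EVERY input (for the tightness theorem) ----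

-- the groups A actually flushes: trailing runs are dropped, and a run whose value equals the
-- current last_repeated_value starts one element late
def aGrps (first : List Int) (i : Nat) (lrv : Option Int) : List (Nat × Nat) :=
  if h : i < first.length then
    if i < pvJ first i then
      (if pvJ first i + 1 < first.length then
        [((if some (first.getD i 0) = lrv then i + 1 else i), pvJ first i)]
      else []) ++ aGrps first (pvJ first i + 1) (some (first.getD i 0))
    else aGrps first (pvJ first i + 1) lrv
  else []
termination_by first.length - i
decreasing_by all_goals (have := pvJ_ge first i; omega)

-- the inputs (suffix from i, with current last_repeated_value lrv) on which A mishandles a run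
def affected (first : List Int) (i : Nat) (lrv : Option Int) : Prop :=
  if h : i < first.length then
    if i < pvJ first i then
      (¬ (pvJ first i + 1 < first.length)) ∨ some (first.getD i 0) = lrv ∨
        affected first (pvJ first i + 1) (some (first.getD i 0))
    else affected first (pvJ first i + 1) lrv
  else False
termination_by first.length - i
decreasing_by all_goals (have := pvJ_ge first i; omega)

theorem scan_all (first : List Int) :
    ∀ (fuel i : Nat) (lv lrv : Option Int) (rep : List (List Int)) (temp : List Int),
      first.length - i ≤ fuel →
      (i < first.length → lv ≠ some (first.getD i 0)) →
      (temp = [] ∨ i < first.length) →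
      ∃ lv' lrv' temp',
        (PySem.List.enumerate (first.drop i) i).foldl aScanStep (lv, lrv, rep, temp) =
          (lv', lrv',
            (rep ++ if temp.isEmpty then [] else [temp]) ++
              (aGrps first i lrv).map (fun g => PySem.List.pyRange (g.1 : Int) ((g.2 : Int) + 1)),
            temp') := by
  intro fuel
  induction fuel with
  | zero =>
    intro i lv lrv rep temp hn hlv htemp
    have hge : first.length ≤ i := by omega
    rcases htemp with rfl | hlt
    · refine ⟨lv, lrv, [], ?_⟩
      rw [aGrps, dif_neg (by omega), List.drop_eq_nil_of_le hge]
      simp [PySem.List.enumerate_nil]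
    · omega
  | succ fuel ih =>
    intro i lv lrv rep temp hn hlv htemp
    by_cases h : i < first.length
    case neg =>
      have hge : first.length ≤ i := by omega
      rcases htemp with rfl | hlt
      · refine ⟨lv, lrv, [], ?_⟩
        rw [aGrps, dif_neg (by omega), List.drop_eq_nil_of_le hge]
        simp [PySem.List.enumerate_nil]
      · omega
    case pos =>
    have hge : i ≤ pvJ first i := pvJ_ge first i
    have hjlt : pvJ first i < first.length := pvJ_lt first h
    have hrun : ∀ k, i ≤ k → k ≤ pvJ first i → first.getD k 0 = first.getD i 0 := pvJ_run first h
    have hstop : pvJ first i + 1 < first.length →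
        first.getD (pvJ first i + 1) 0 ≠ first.getD i 0 := pvJ_stop first i
    have hchunk : first.drop i
        = List.replicate (pvJ first i + 1 - i) (first.getD i 0) ++ first.drop (pvJ first i + 1) := by
      conv_lhs => rw [← List.take_append_drop (pvJ first i + 1 - i) (first.drop i)]
      congr 1
      · apply List.ext_getElem
        · simp [List.length_take, List.length_drop]
          omega
        · intro n h1 h2
          rw [List.getElem_take, List.getElem_drop, List.getElem_replicate]
          have hlen1 : (List.take (pvJ first i + 1 - i) (first.drop i)).length
              = pvJ first i + 1 - i := by simp [List.length_take, List.length_drop]; omega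
          rw [hlen1] at h1
          have := hrun (i + n) (by omega) (by omega)
          rw [List.getD_eq_getElem _ _ (by omega : i + n < first.length)] at this
          exact this
      · rw [List.drop_drop]
        congr 1
        omega
    rw [hchunk, PySem.List.enumerate_append, List.foldl_append, List.length_replicate]
    have hs2 : (i : Int) + ((pvJ first i + 1 - i : Nat) : Int) = ((pvJ first i + 1 : Nat) : Int) := by
      omega
    rw [hs2]
    rcases Nat.eq_or_lt_of_le hge with heq | hij
    · -- singleton run
      have hrep1 : pvJ first i + 1 - i = 1 := by omega
      rw [hrep1]
      have hfold1 : (PySem.List.enumerate (List.replicate 1 (first.getD i 0)) i).foldl aScanStep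
            (lv, lrv, rep, temp)
          = (some (first.getD i 0), lrv, rep ++ (if temp.isEmpty then [] else [temp]), []) := by
        rw [show List.replicate 1 (first.getD i 0) = [first.getD i 0] from rfl,
          PySem.List.enumerate_cons, PySem.List.enumerate_nil, List.foldl_cons, List.foldl_nil,
          scan_flush _ _ _ _ _ _ (hlv h)]
      rw [hfold1]
      have hnext : pvJ first i + 1 = i + 1 := by omega
      rw [hnext]
      obtain ⟨lv', lrv', temp', hres⟩ := ih (i + 1) (some (first.getD i 0)) lrv
        (rep ++ (if temp.isEmpty then [] else [temp])) [] (by omega)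
        (by
          intro hi1 hc
          injection hc with hc
          have := hstop (by omega)
          rw [hnext] at this
          exact this hc.symm)
        (Or.inl rfl)
      refine ⟨lv', lrv', temp', ?_⟩
      rw [hres]
      conv_rhs => rw [aGrps, dif_pos h, if_neg (by omega : ¬ i < pvJ first i)]
      rw [← heq]
      simp [List.append_assoc]
    · -- duplicate run
      have hrep2 : pvJ first i + 1 - i = (pvJ first i - i - 1) + 2 := by omega
      rw [hrep2, List.replicate_succ, List.replicate_succ, PySem.List.enumerate_cons,
        PySem.List.enumerate_cons, List.foldl_cons, List.foldl_cons,
        scan_flush _ _ _ _ _ _ (hlv h)]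
      by_cases hq : some (first.getD i 0) = lrv
      · -- the stale last_repeated_value quirk: the group starts one element late
        subst hq
        have hstep2 : aScanStep
              (some (first.getD i 0), some (first.getD i 0),
                rep ++ (if temp.isEmpty then [] else [temp]), []) ((i : Int) + 1, first.getD i 0)
            = (some (first.getD i 0), some (first.getD i 0),
                rep ++ (if temp.isEmpty then [] else [temp]), [(i : Int) + 1]) := by
          simp [aScanStep]
        rw [hstep2,
          scan_mid (first.getD i 0) (some (first.getD i 0))
            (rep ++ (if temp.isEmpty then [] else [temp])) (pvJ first i - i - 1) ((i : Int) + 1 + 1)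
            [(i : Int) + 1] rfl]
        have htempeq : [(i : Int) + 1] ++
              PySem.List.pyRange ((i : Int) + 1 + 1)
                ((i : Int) + 1 + 1 + ((pvJ first i - i - 1 : Nat) : Int))
            = PySem.List.pyRange ((i : Int) + 1) ((pvJ first i : Int) + 1) := by
          rw [PySem.List.pyRange_one_cons (by omega : (i : Int) + 1 < (pvJ first i : Int) + 1)]
          have e2 : (i : Int) + 1 + 1 + ((pvJ first i - i - 1 : Nat) : Int)
              = (pvJ first i : Int) + 1 := by omega
          rw [e2]
          rfl
        rw [htempeq]
        by_cases hj1 : pvJ first i + 1 < first.length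
        · obtain ⟨lv', lrv', temp', hres⟩ := ih (pvJ first i + 1) (some (first.getD i 0))
            (some (first.getD i 0)) (rep ++ (if temp.isEmpty then [] else [temp]))
            (PySem.List.pyRange ((i : Int) + 1) ((pvJ first i : Int) + 1)) (by omega)
            (by
              intro _ hc
              injection hc with hc
              exact (hstop hj1) hc.symm)
            (Or.inr hj1)
          refine ⟨lv', lrv', temp', ?_⟩
          rw [hres]
          have hne : (PySem.List.pyRange ((i : Int) + 1) ((pvJ first i : Int) + 1)).isEmpty
              = false := by
            rw [PySem.List.pyRange_one_cons (by omega : (i : Int) + 1 < (pvJ first i : Int) + 1)]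
            rfl
          rw [hne]
          conv_rhs => rw [aGrps, dif_pos h, if_pos hij, if_pos hj1, if_pos rfl]
          simp [List.append_assoc]
        · -- trailing duplicate run: never flushed
          rw [List.drop_eq_nil_of_le (by omega : first.length ≤ pvJ first i + 1)]
          refine ⟨some (first.getD i 0), some (first.getD i 0),
            PySem.List.pyRange ((i : Int) + 1) ((pvJ first i : Int) + 1), ?_⟩
          conv_rhs => rw [aGrps, dif_pos h, if_pos hij, if_neg hj1,
            aGrps, dif_neg (by omega : ¬ pvJ first i + 1 < first.length)]
          simp [PySem.List.enumerate_nil]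
      · -- normal duplicate run
        rw [scan_dup2 _ _ _ _ (fun hc => hq hc.symm),
          scan_mid (first.getD i 0) (some (first.getD i 0))
            (rep ++ (if temp.isEmpty then [] else [temp])) (pvJ first i - i - 1) ((i : Int) + 1 + 1)
            [(i : Int) + 1 - 1, (i : Int) + 1] rfl]
        have htempeq : [(i : Int) + 1 - 1, (i : Int) + 1] ++
              PySem.List.pyRange ((i : Int) + 1 + 1)
                ((i : Int) + 1 + 1 + ((pvJ first i - i - 1 : Nat) : Int))
            = PySem.List.pyRange (i : Int) ((pvJ first i : Int) + 1) := by
          rw [PySem.List.pyRange_one_cons (by omega : (i : Int) < (pvJ first i : Int) + 1),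
            PySem.List.pyRange_one_cons (by omega : (i : Int) + 1 < (pvJ first i : Int) + 1)]
          have e1 : (i : Int) + 1 - 1 = (i : Int) := by ring
          have e2 : (i : Int) + 1 + 1 + ((pvJ first i - i - 1 : Nat) : Int)
              = (pvJ first i : Int) + 1 := by omega
          rw [e1, e2]
          rfl
        rw [htempeq]
        by_cases hj1 : pvJ first i + 1 < first.length
        · obtain ⟨lv', lrv', temp', hres⟩ := ih (pvJ first i + 1) (some (first.getD i 0))
            (some (first.getD i 0)) (rep ++ (if temp.isEmpty then [] else [temp]))
            (PySem.List.pyRange (i : Int) ((pvJ first i : Int) + 1)) (by omega)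
            (by
              intro _ hc
              injection hc with hc
              exact (hstop hj1) hc.symm)
            (Or.inr hj1)
          refine ⟨lv', lrv', temp', ?_⟩
          rw [hres]
          have hne : (PySem.List.pyRange (i : Int) ((pvJ first i : Int) + 1)).isEmpty = false := by
            rw [PySem.List.pyRange_one_cons (by omega : (i : Int) < (pvJ first i : Int) + 1)]
            rfl
          rw [hne]
          conv_rhs => rw [aGrps, dif_pos h, if_pos hij, if_pos hj1, if_neg hq]
          simp [List.append_assoc]
        · -- trailing duplicate run: never flushed
          rw [List.drop_eq_nil_of_le (by omega : first.length ≤ pvJ first i + 1)]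
          refine ⟨some (first.getD i 0), some (first.getD i 0),
            PySem.List.pyRange (i : Int) ((pvJ first i : Int) + 1), ?_⟩
          conv_rhs => rw [aGrps, dif_pos h, if_pos hij, if_neg hj1,
            aGrps, dif_neg (by omega : ¬ pvJ first i + 1 < first.length)]
          simp [PySem.List.enumerate_nil]

theorem aGrps_le (first : List Int) :
    ∀ (i : Nat) (lrv : Option Int) (g : Nat × Nat), g ∈ aGrps first i lrv →
      g.1 ≤ g.2 ∧ g.2 < first.length := by
  have aux : ∀ (n i : Nat) (lrv : Option Int), first.length - i ≤ n →
      ∀ g ∈ aGrps first i lrv, g.1 ≤ g.2 ∧ g.2 < first.length := by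
    intro n
    induction n with
    | zero =>
      intro i lrv hn g hg
      rw [aGrps, dif_neg (by omega)] at hg
      simp at hg
    | succ n ih =>
      intro i lrv hn g hg
      rw [aGrps] at hg
      by_cases h : i < first.length
      · rw [dif_pos h] at hg
        have hge := pvJ_ge first i
        have hlt := pvJ_lt first h
        by_cases hij : i < pvJ first i
        · rw [if_pos hij] at hg
          rcases List.mem_append.mp hg with h1 | h1
          · by_cases hj1 : pvJ first i + 1 < first.length
            · rw [if_pos hj1] at h1
              simp at h1
              subst h1
              refine ⟨?_, hlt⟩
              split <;> omega
            · rw [if_neg hj1] at h1; simp at h1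
          · exact ih (pvJ first i + 1) _ (by omega) g h1
        · rw [if_neg hij] at hg
          exact ih (pvJ first i + 1) _ (by omega) g hg
      · rw [dif_neg h] at hg; simp at hg
  exact fun i lrv => aux (first.length - i) i lrv le_rfl

-- ---- part 7: length comparison ----

theorem aPop_length (xs : List Int) (k : Int) : xs.length - 1 ≤ (aPop xs k).length := by
  unfold aPop
  cases hp : PySem.List.pop? xs k with
  | none => simp
  | some r =>
    have := PySem.List.length_of_pop?_eq_some xs hp
    simp
    omega

theorem popAll_length_ge :
    ∀ (K : List Int) (xs : List Int), xs.length ≤ (pvPopAll xs K).length + K.length := by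
  intro K
  induction K with
  | nil => intro xs; simp [pvPopAll]
  | cons k K ih =>
    intro xs
    unfold pvPopAll
    rw [List.foldl_cons]
    have h1 := aPop_length xs k
    have h2 := ih (aPop xs k)
    unfold pvPopAll at h2
    simp only [List.length_cons]
    omega

theorem popAll_length_eq :
    ∀ (K : List Int) (xs : List Int), K.Pairwise (· > ·) →
      (∀ k ∈ K, 0 ≤ k ∧ k < (xs.length : Int)) →
      (pvPopAll xs K).length + K.length = xs.length := by
  intro K
  induction K with
  | nil => intro xs _ _; simp [pvPopAll]
  | cons k K ih =>
    intro xs hpw hb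
    obtain ⟨hK', hpw'⟩ := List.pairwise_cons.mp hpw
    obtain ⟨hk0, hklt⟩ := hb k List.mem_cons_self
    have hin : k.toNat < xs.length := by omega
    have hkc : (k.toNat : Int) = k := Int.toNat_of_nonneg hk0
    unfold pvPopAll
    rw [List.foldl_cons, show aPop xs k = xs.eraseIdx k.toNat by
      rw [← hkc]; exact aPop_in xs k.toNat hin]
    have hlen : (xs.eraseIdx k.toNat).length = xs.length - 1 := by
      rw [List.length_eraseIdx_of_lt hin]
    have hb' : ∀ x ∈ K, 0 ≤ x ∧ x < ((xs.eraseIdx k.toNat).length : Int) := by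
      intro x hx
      have := hK' x hx
      have := (hb x (List.mem_cons_of_mem _ hx)).1
      rw [hlen]
      constructor
      · omega
      · omega
    have := ih (xs.eraseIdx k.toNat) hpw' hb'
    unfold pvPopAll at this
    simp only [List.length_cons]
    omega

theorem bBest_mem (second : List Int) (inverse : Bool) (a b : Nat) (hab : a ≤ b) :
    bBest second inverse a b ∈ PySem.List.pyRange (a : Int) ((b : Int) + 1) := by
  have aux : ∀ (ks : List Int) (b0 : Int),
      ks.foldl (fun b k => if bBetter second inverse b k then k else b) b0 ∈ b0 :: ks := by
    intro ks
    induction ks with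
    | nil => intro b0; simp
    | cons k ks ih =>
      intro b0
      rw [List.foldl_cons]
      by_cases hbb : bBetter second inverse b0 k
      · rw [if_pos hbb]
        have := ih k
        rcases List.mem_cons.mp this with h1 | h1
        · rw [h1]; simp
        · simp [h1]
      · rw [if_neg hbb]
        have := ih b0
        rcases List.mem_cons.mp this with h1 | h1
        · rw [h1]; simp
        · simp [h1]
  unfold bBest
  rw [PySem.List.pyRange_one_cons (by omega : (a : Int) < (b : Int) + 1)]
  exact aux _ _

theorem pvAsc_length (second : List Int) (inverse : Bool) (a b : Nat) (hab : a ≤ b) :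
    (pvAsc second inverse (a, b)).length = b - a := by
  have herase : (PySem.List.pyRange (a : Int) ((b : Int) + 1)).erase (bBest second inverse a b)
      = pvAsc second inverse (a, b) := by
    rw [(PySem.List.nodup_pyRange_one _ _).erase_eq_filter]
    unfold pvAsc
    exact List.filter_congr (by intro x _; by_cases h : x = bBest second inverse a b <;> simp [h])
  rw [← herase, List.length_erase_of_mem (bBest_mem second inverse a b hab),
    PySem.List.length_pyRange_one]
  omega

theorem pvRem_unfold (first second : List Int) (inverse : Bool) (i : Nat) (h : i < first.length) :
    pvRem first second inverse i =
      (if i < pvJ first i then pvAsc second inverse (i, pvJ first i) else []) ++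
        pvRem first second inverse (pvJ first i + 1) := by
  unfold pvRem
  rw [pvGrps, dif_pos h, List.flatMap_append]
  by_cases hij : i < pvJ first i
  · simp [hij]
  · simp [hij]

theorem pvRem_ub (first second : List Int) (inverse : Bool) (i : Nat) (x : Int)
    (hx : x ∈ pvRem first second inverse i) : x < (first.length : Int) := by
  obtain ⟨g, hg, hxg⟩ := List.mem_flatMap.mp hx
  have h1 := (pvGrps_mem first i g hg).2.2
  have h2 := (pvAsc_bounds second inverse g x hxg).2
  omega

-- total removal of A is at most that of B, strictly smaller on an affected suffix
theorem rem_compare (first second : List Int) (inverse : Bool) :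
    ∀ (n i : Nat) (lrv : Option Int), first.length - i ≤ n →
      ((aGrps first i lrv).flatMap (pvAsc second inverse)).length ≤
          (pvRem first second inverse i).length ∧
        (affected first i lrv →
          ((aGrps first i lrv).flatMap (pvAsc second inverse)).length <
            (pvRem first second inverse i).length) := by
  intro n
  induction n with
  | zero =>
    intro i lrv hn
    constructor
    · rw [aGrps, dif_neg (by omega)]
      simp
    · intro haff
      rw [affected, dif_neg (by omega)] at haff
      exact haff.elim
  | succ n ih =>
    intro i lrv hn
    by_cases h : i < first.length
    case neg =>
      constructor
      · rw [aGrps, dif_neg h]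
        simp
      · intro haff
        rw [affected, dif_neg h] at haff
        exact haff.elim
    case pos =>
    have hge := pvJ_ge first i
    have hlt := pvJ_lt first h
    have hrem := pvRem_unfold first second inverse i h
    rw [aGrps, dif_pos h, affected, dif_pos h, hrem]
    by_cases hij : i < pvJ first i
    · rw [if_pos hij, if_pos hij, if_pos hij]
      obtain ⟨ihle, ihlt⟩ := ih (pvJ first i + 1) (some (first.getD i 0)) (by omega)
      rw [List.flatMap_append, List.length_append, List.length_append]
      have hB : (pvAsc second inverse (i, pvJ first i)).length = pvJ first i - i :=
        pvAsc_length second inverse i (pvJ first i) (by omega)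
      by_cases hj1 : pvJ first i + 1 < first.length
      · rw [if_pos hj1]
        simp only [List.flatMap_cons, List.flatMap_nil, List.append_nil]
        by_cases hq : some (first.getD i 0) = lrv
        · rw [if_pos hq]
          have hA : (pvAsc second inverse (i + 1, pvJ first i)).length = pvJ first i - (i + 1) :=
            pvAsc_length second inverse (i + 1) (pvJ first i) (by omega)
          constructor
          · rw [hA, hB]; omega
          · intro _; rw [hA, hB]; omega
        · rw [if_neg hq]
          constructor
          · rw [hB]; omega
          · intro haff
            rcases haff with h1 | h1 | h1
            · exact absurd hj1 h1
            · exact absurd h1 hq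
            · have := ihlt h1
              rw [hB]
              omega
      · rw [if_neg hj1]
        simp only [List.flatMap_nil, List.length_nil]
        constructor
        · rw [hB]; omega
        · intro _; rw [hB]; omega
    · rw [if_neg hij, if_neg hij, if_neg hij]
      simpa using ih (pvJ first i + 1) lrv (by omega)

-- ---- part 8: D_ implies an affected run ----

theorem D_trailing_affected (first : List Int) (h2 : 2 ≤ first.length)
    (heq : first.getD (first.length - 1) 0 = first.getD (first.length - 2) 0) :
    ∀ (n i : Nat) (lrv : Option Int), first.length - i ≤ n → i < first.length →
      (i = 0 ∨ first.getD (i - 1) 0 ≠ first.getD i 0) → affected first i lrv := by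
  intro n
  induction n with
  | zero => intro i lrv hn hi hrs; omega
  | succ n ih =>
    intro i lrv hn hi hrs
    rw [affected, dif_pos hi]
    have hge := pvJ_ge first i
    have hjlt := pvJ_lt first hi
    have hrun := pvJ_run first hi
    have hstop := pvJ_stop first i
    by_cases hj1 : pvJ first i + 1 < first.length
    · have hnewrs : pvJ first i + 1 = 0 ∨
          first.getD (pvJ first i + 1 - 1) 0 ≠ first.getD (pvJ first i + 1) 0 := by
        right
        have h1 : pvJ first i + 1 - 1 = pvJ first i := by omega
        rw [h1, hrun (pvJ first i) (by omega) (by omega)]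
        exact fun hc => (hstop hj1) hc.symm
      by_cases hij : i < pvJ first i
      · rw [if_pos hij]
        right; right
        exact ih (pvJ first i + 1) (some (first.getD i 0)) (by omega) hj1 hnewrs
      · rw [if_neg hij]
        exact ih (pvJ first i + 1) lrv (by omega) hj1 hnewrs
    · by_cases hij : i < pvJ first i
      · rw [if_pos hij]
        left
        exact hj1
      · exfalso
        have hieq : i = first.length - 1 := by omega
        rcases hrs with rfl | hrs
        · omega
        · apply hrs
          have h1 : i - 1 = first.length - 2 := by omega
          rw [h1, hieq]
          exact heq.symm

theorem D_quirk_affected (first : List Int) (hq : pvQuirk first) :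
    affected first 0 none := by
  obtain ⟨k, hkn, l, hln, hkl, hk1, hl1, hdupk, hdupl, hvals,
    ⟨m0, hm0n, hm0a, hm0b, hm0ne⟩, hmid⟩ := hq
  have aux : ∀ (n i : Nat) (lrv : Option Int), first.length - i ≤ n → i ≤ l →
      (i = 0 ∨ first.getD (i - 1) 0 ≠ first.getD i 0) →
      (i ≤ k ∨ (k < i ∧ lrv = some (first.getD k 0))) →
      affected first i lrv := by
    intro n
    induction n with
    | zero => intro i lrv hn hil hrs hdis; omega
    | succ n ih =>
      intro i lrv hn hil hrs hdis
      have h : i < first.length := by omega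
      rw [affected, dif_pos h]
      have hge := pvJ_ge first i
      have hjlt := pvJ_lt first h
      have hrun := pvJ_run first h
      have hstop := pvJ_stop first i
      by_cases hij : i < pvJ first i
      · rw [if_pos hij]
        rcases hdis with hik | ⟨hki, hlrv⟩
        · -- k is still ahead (or inside this run)
          by_cases hjk : pvJ first i < k
          · -- the run ends before k
            right; right
            exact ih (pvJ first i + 1) (some (first.getD i 0)) (by omega) (by omega)
              (Or.inr (by
                have h1 : pvJ first i + 1 - 1 = pvJ first i := by omega
                rw [h1, hrun (pvJ first i) (by omega) (by omega)]
                exact fun hc => (hstop (by omega)) hc.symm))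
              (Or.inl (by omega))
          · -- the run contains k, so its value is first.getD k 0
            have hvk : first.getD i 0 = first.getD k 0 := (hrun k hik (by omega)).symm
            have hlj : pvJ first i < l := by
              by_contra hc
              have hml : m0 ≤ pvJ first i := by omega
              exact hm0ne ((hrun m0 (by omega) hml).trans hvk)
            right; right
            refine ih (pvJ first i + 1) (some (first.getD i 0)) (by omega) (by omega)
              (Or.inr (by
                have h1 : pvJ first i + 1 - 1 = pvJ first i := by omega
                rw [h1, hrun (pvJ first i) (by omega) (by omega)]
                exact fun hc => (hstop (by omega)) hc.symm))
              (Or.inr ⟨by omega, by rw [hvk]⟩)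
        · -- the last duplicate run before i had value first.getD k 0
          by_cases hv : first.getD i 0 = first.getD k 0
          · right; left
            rw [hlrv, hv]
          · exfalso
            have hil' : i < l := by
              rcases Nat.eq_or_lt_of_le hil with rfl | h'
              · exact (hv hvals.symm).elim
              · exact h'
            exact hv (hmid i (by omega) hki hil' (by omega)
              (hrun (i + 1) (by omega) (by omega)))
      · rw [if_neg hij]
        have hJi : pvJ first i = i := by omega
        -- a singleton run: i cannot be l (l starts a duplicate pair), nor k
        have hil' : i < l := by
          rcases Nat.eq_or_lt_of_le hil with rfl | h'
          · exfalso
            have := hstop (by omega)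
            rw [hJi] at this
            exact this hdupl
          · exact h'
        have hik' : i ≤ k → i < k := by
          intro hik
          rcases Nat.eq_or_lt_of_le hik with rfl | h'
          · exfalso
            have := hstop (by omega)
            rw [hJi] at this
            exact this hdupk
          · exact h'
        rw [hJi]
        refine ih (i + 1) lrv (by omega) (by omega)
          (Or.inr (by
            have h1 : i + 1 - 1 = i := by omega
            rw [h1]
            have := hstop (by omega)
            rw [hJi] at this
            exact fun hc => this hc.symm))
          ?_
        rcases hdis with hik | ⟨hki, hlrv⟩
        · exact Or.inl (hik' hik)
        · exact Or.inr ⟨by omega, hlrv⟩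
  exact aux first.length 0 none (by omega) (by omega) (Or.inl rfl) (Or.inl (by omega))

theorem D_affected (first second : List Int) (inverse : Bool)
    (hD : D_clean_first_list_py first second inverse) : affected first 0 none := by
  rcases hD with ⟨h2, heq⟩ | hq
  · exact D_trailing_affected first h2 heq first.length 0 none (by omega) (by omega) (Or.inl rfl)
  · exact D_quirk_affected first hq

-- ===== VERDICT (by name: the statement is the Claim_ definition above) =====
theorem clean_first_list_py_spec : Claim_unchanged_clean_first_list_py := by
  unfold Claim_unchanged_clean_first_list_py
  intro first second inverse _hDom _hPre
  unfold Spec_clean_first_list_py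
  intro hD
  unfold D_clean_first_list_py at hD
  rw [not_or] at hD
  obtain ⟨hT, hQ⟩ := hD
  have hQ' : ¬ pvQuirk first := hQ
  obtain ⟨lv', lrv', temp', hscan⟩ := scan_from first hT hQ' first.length 0 none none [] []
    (by omega) (fun _ => by simp) (fun _ => Or.inl rfl) (Or.inl rfl)
    (fun w hw => by simp at hw)
  rw [List.drop_zero] at hscan
  have hscan' : (PySem.List.enumerate first 0).foldl aScanStep (none, none, [], []) =
      (lv', lrv',
        (pvGrps first 0).map (fun g => PySem.List.pyRange (g.1 : Int) ((g.2 : Int) + 1)), temp') := by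
    simpa using hscan
  have hpw : ((pvRem first second inverse 0).reverse).Pairwise (· > ·) :=
    List.pairwise_reverse.mpr (pvRem_pairwise first second inverse 0)
  have hnn : ∀ k ∈ (pvRem first second inverse 0).reverse, (0 : Int) ≤ k := by
    intro k hk
    have := pvRem_lb first second inverse 0 k (List.mem_reverse.mp hk)
    omega
  have hmem : ∀ z : Int,
      z ∈ bRemovalLoop first second inverse first.length 0 PySem.Set.empty ↔
        z ∈ pvRem first second inverse 0 := by
    intro z
    rw [bLoop_mem first second inverse first.length 0 _ (by omega) z]
    simp [PySem.Set.empty]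
  have hpred : ∀ p : Int × Int,
      (decide (p.1 ∉ (pvRem first second inverse 0).reverse))
        = !(PySem.Set.contains
            (bRemovalLoop first second inverse first.length 0 PySem.Set.empty) p.1) := by
    intro p
    rw [PySem.Set.contains_eq_decide, ← decide_not]
    apply decide_eq_decide.mpr
    rw [List.mem_reverse, hmem]
  unfold clean_first_list_py
  simp only [hscan']
  rw [removeFold second inverse (pvGrps first 0)
    (fun g hg => le_of_lt (pvGrps_mem first 0 g hg).2.1) (first, second)]
  have hKdef : (pvGrps first 0).flatMap (pvAsc second inverse) = pvRem first second inverse 0 := rfl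
  rw [hKdef]
  rw [popAll_eq_filter ((pvRem first second inverse 0).reverse) first hpw hnn,
    popAll_eq_filter ((pvRem first second inverse 0).reverse) second hpw hnn]
  unfold clean_first_list_py_alt
  refine Prod.ext ?_ ?_
  · simp only
    congr 1
    exact List.filter_congr (fun p _ => hpred p)
  · simp only
    congr 1
    exact List.filter_congr (fun p _ => hpred p)

theorem clean_first_list_py_changed : Claim_changed_clean_first_list_py := by
  unfold Claim_changed_clean_first_list_py; decide

theorem clean_first_list_py_tight : Claim_exact_clean_first_list_py := by
  unfold Claim_exact_clean_first_list_py
  intro first second inverse _hDom _hPre hD hEq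
  obtain ⟨lv', lrv', temp', hscan⟩ := scan_all first first.length 0 none none [] []
    (by omega) (fun _ => by simp) (Or.inl rfl)
  rw [List.drop_zero] at hscan
  have hscan' : (PySem.List.enumerate first 0).foldl aScanStep (none, none, [], []) =
      (lv', lrv',
        (aGrps first 0 none).map (fun g => PySem.List.pyRange (g.1 : Int) ((g.2 : Int) + 1)),
        temp') := by
    simpa using hscan
  have hA : clean_first_list_py first second inverse
      = (pvPopAll first ((aGrps first 0 none).flatMap (pvAsc second inverse)).reverse,
         pvPopAll second ((aGrps first 0 none).flatMap (pvAsc second inverse)).reverse) := by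
    unfold clean_first_list_py
    simp only [hscan']
    rw [removeFold second inverse (aGrps first 0 none)
      (fun g hg => (aGrps_le first 0 none g hg).1) (first, second)]
  have hpw : ((pvRem first second inverse 0).reverse).Pairwise (· > ·) :=
    List.pairwise_reverse.mpr (pvRem_pairwise first second inverse 0)
  have hnn : ∀ x ∈ (pvRem first second inverse 0).reverse, 0 ≤ x ∧ x < (first.length : Int) := by
    intro x hx
    have hx' := List.mem_reverse.mp hx
    refine ⟨?_, pvRem_ub first second inverse 0 x hx'⟩
    have := pvRem_lb first second inverse 0 x hx'
    omega
  have hmem : ∀ z : Int,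
      z ∈ bRemovalLoop first second inverse first.length 0 PySem.Set.empty ↔
        z ∈ pvRem first second inverse 0 := by
    intro z
    rw [bLoop_mem first second inverse first.length 0 _ (by omega) z]
    simp [PySem.Set.empty]
  have hpred : ∀ p : Int × Int,
      (decide (p.1 ∉ (pvRem first second inverse 0).reverse))
        = !(PySem.Set.contains
            (bRemovalLoop first second inverse first.length 0 PySem.Set.empty) p.1) := by
    intro p
    rw [PySem.Set.contains_eq_decide, ← decide_not]
    apply decide_eq_decide.mpr
    rw [List.mem_reverse, hmem]
  have hB : (clean_first_list_py_alt first second inverse).1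
      = pvPopAll first ((pvRem first second inverse 0).reverse) := by
    unfold clean_first_list_py_alt
    simp only
    rw [popAll_eq_filter ((pvRem first second inverse 0).reverse) first hpw
      (fun k hk => (hnn k hk).1)]
    congr 1
    exact (List.filter_congr (fun p _ => hpred p)).symm
  have hAlen := popAll_length_ge
    (((aGrps first 0 none).flatMap (pvAsc second inverse)).reverse) first
  have hBlen := popAll_length_eq ((pvRem first second inverse 0).reverse) first hpw hnn
  have hcmp := (rem_compare first second inverse first.length 0 none (by omega)).2
    (D_affected first second inverse hD)
  have hfst : (pvPopAll first
        (((aGrps first 0 none).flatMap (pvAsc second inverse)).reverse)).length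
      = (pvPopAll first ((pvRem first second inverse 0).reverse)).length := by
    have := congrArg (fun q : List Int × List Int => q.1.length) hEq
    simp only at this
    rw [hA] at this
    rw [hB] at this
    simpa using this
  simp only [List.length_reverse] at hAlen hBlen
  omega
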